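-- pv_equiv track=rewrite | github.com/a-gavriel/Python-Games | Tools/OnePiece_renamer.py | episode_conv
-- ===== SOURCE A (Python) =====
-- def episode_conv(num) -> tuple:
--
--   num = int(num)
--
--   seasons_episodes = { #TVDB Air
--     1:8,
--     2:22,
--     3:17,
--     4:13,
--     5:9,
--     6:22,
--     7:39,
--     8:13,
--     9:52,
--     10:31,
--     11:99,
--     12:56,
--     13:100,
--     14:35,
--     15:62,
--     16:49,
--     17:118,
--     18:33,
--     19:98,
--     20:14,
--     21:999
--   }
--   """
--
--   seasons_episodes = {
--     1 : 61,
--     2 : 16,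
--     3 : 15,
--     4 : 51,
--     5 : 30,
--     6 : 33,
--     7 : 22,
--     8 : 35,
--     9 : 21,
--     10 : 22,
--     11 : 30,
--     12 : 45,
--     13 : 26,
--     14 : 14,
--     15 : 37,
--     16 : 58,
--     17 : 62,
--     18 : 50,
--     19 : 122,
--     20 : 32,
--     21 : 95,
--     22 : 999
--   }"""
--
--   carriage = 0
--   for season_n, episodes_total in seasons_episodes.items():
--     added = episodes_total + carriage
--     if num <= added:
--       return (zpad(season_n,2), zpad(num - carriage, 3))
--     carriage = added
--
--   raise Exception(f"Error in episode:{num}.")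
--
-- def zpad(n, digits: int) -> str:
--   n = str(int(n))
--   while len(n) < digits:
--     n = "0" + n
--   return n
-- ===== SOURCE B (Python) =====
-- _COUNTS = [8, 22, 17, 13, 9, 22, 39, 13, 52, 31, 99,
--            56, 100, 35, 62, 49, 118, 33, 98, 14, 999]
--
-- def _prefix():
--     pre, total = [], 0
--     for c in _COUNTS:
--         total += c
--         pre.append(total)
--     return pre
--
-- def zpad(n, digits):
--     s = str(int(n))
--     return "0" * (digits - len(s)) + s
--
-- def episode_conv(num) -> tuple:
--     num = int(num)
--     pre = _prefix()
--     # binary search: first index lo with num <= pre[lo]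
--     lo, hi = 0, len(pre)
--     while lo < hi:
--         mid = (lo + hi) // 2
--         if pre[mid] < num:
--             lo = mid + 1
--         else:
--             hi = mid
--     if lo == len(pre):
--         raise Exception(f"Error in episode:{num}.")
--     below = pre[lo - 1] if lo > 0 else 0
--     return (zpad(lo + 1, 2), zpad(num - below, 3))
-- ===== Notes on version B (the rewrite author's own statement) =====
-- stated objective: alternative
-- what changed: A's accumulating linear scan over the season dict is replaced by a precomputed prefix-sum table queried with a hand-written binary search, and zpad's while loop by a single replicate-and-concatenate pad.
import Mathlib
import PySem

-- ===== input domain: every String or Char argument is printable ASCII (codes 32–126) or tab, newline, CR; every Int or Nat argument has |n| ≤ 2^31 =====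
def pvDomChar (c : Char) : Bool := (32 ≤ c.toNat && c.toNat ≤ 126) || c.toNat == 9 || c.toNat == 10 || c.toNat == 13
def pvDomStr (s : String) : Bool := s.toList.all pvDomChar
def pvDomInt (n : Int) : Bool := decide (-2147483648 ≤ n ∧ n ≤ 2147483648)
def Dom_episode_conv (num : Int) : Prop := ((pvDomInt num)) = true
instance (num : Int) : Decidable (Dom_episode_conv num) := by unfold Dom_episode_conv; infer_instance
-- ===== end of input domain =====

-- B replaces A's accumulating linear scan of the season table by a precomputed
-- prefix-sum table plus a binary search (and a replicate-based zero-pad); same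
-- return value wherever A returns.

-- ===== PORT A =====
-- zpad's while loop, on the character list of str(int(n))
def zpadLoopA (s : List Char) (digits : Nat) : List Char :=
  if s.length < digits then zpadLoopA ('0' :: s) digits else s
termination_by digits - s.length
decreasing_by simp; omega

def zpadA (n : Int) (digits : Nat) : String :=
  String.ofList (zpadLoopA (PySem.Int.toChars n) digits)

-- seasons_episodes.items() in insertion order
def seasonsA : List (Int × Int) := [(1, 8), (2, 22), (3, 17), (4, 13), (5, 9), (6, 22), (7, 39), (8, 13), (9, 52), (10, 31), (11, 99), (12, 56), (13, 100), (14, 35), (15, 62), (16, 49), (17, 118), (18, 33), (19, 98), (20, 14), (21, 999)]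

-- the for loop over the table, carrying `carriage`; none = the final raise
def loopA : List (Int × Int) → Int → Int → Option (String × String)
  | [], _, _ => none
  | (sn, et) :: rest, num, carriage =>
    if num ≤ et + carriage then some (zpadA sn 2, zpadA (num - carriage) 3)
    else loopA rest num (et + carriage)

def episode_conv (num : Int) : String × String :=
  (loopA seasonsA num 0).getD ("", "")

-- ===== PORT B =====
def countsB : List Int := [8, 22, 17, 13, 9, 22, 39, 13, 52, 31, 99, 56, 100, 35, 62, 49, 118, 33, 98, 14, 999]

-- the prefix-building loop of _prefix()
def buildPrefix : List Int → Int → List Int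
  | [], _ => []
  | c :: rest, total => (total + c) :: buildPrefix rest (total + c)

def zpadB (n : Int) (digits : Nat) : String :=
  String.ofList (List.replicate (digits - (PySem.Int.toChars n).length) '0' ++ PySem.Int.toChars n)

-- the hand-written binary-search while loop (indices are in range, so getD is exact)
def bsB (pre : List Int) (num : Int) (lo hi : Nat) : Nat :=
  if lo < hi then
    if pre.getD ((lo + hi) / 2) 0 < num then bsB pre num ((lo + hi) / 2 + 1) hi
    else bsB pre num lo ((lo + hi) / 2)
  else lo
termination_by hi - lo
decreasing_by all_goals omega

def episode_conv_alt (num : Int) : String × String :=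
  let pre := buildPrefix countsB 0
  let lo := bsB pre num 0 pre.length
  if lo = pre.length then ("", "")  -- Python raises here; excluded by Pre_
  else
    (zpadB ((lo : Int) + 1) 2,
     zpadB (num - (if 0 < lo then pre.getD (lo - 1) 0 else 0)) 3)

-- ===== PRECONDITION & SPEC =====
-- A raises Exception for num > 1889 (the table's total); B raises there too.
def Pre_episode_conv (num : Int) : Prop := num ≤ 1889
instance (num : Int) : Decidable (Pre_episode_conv num) := by unfold Pre_episode_conv; infer_instance
def pvWitness_episode_conv : Int := (100)

def Spec_episode_conv (num : Int) (out : String × String) : Prop := out = episode_conv_alt num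
instance (num : Int) (out : String × String) : Decidable (Spec_episode_conv num out) := by unfold Spec_episode_conv; infer_instance

-- ===== CLAIM (what is proved, stated in full; the proofs are below) =====
def Claim_equal_episode_conv : Prop := ∀ (num : Int), Dom_episode_conv num → Pre_episode_conv num → Spec_episode_conv num (episode_conv num)

-- ===== LEMMAS AND PROOFS =====
def preLit : List Int := [8, 30, 47, 60, 69, 91, 130, 143, 195, 226, 325, 381, 481, 516, 578, 627, 745, 778, 876, 890, 1889]

theorem prefix_eval : buildPrefix countsB 0 = preLit := by decide
theorem preLit_len : preLit.length = 21 := by decide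

-- A's zpad while loop is exactly a left pad with replicated zeros
theorem zpadLoopA_eq (s : List Char) (d : Nat) :
    zpadLoopA s d = List.replicate (d - s.length) '0' ++ s := by
  fun_induction zpadLoopA s d with
  | case1 s' h ih =>
      rw [ih]
      have h1 : d - s'.length = (d - ('0'::s').length) + 1 := by simp; omega
      rw [h1, List.replicate_succ']
      simp
  | case2 s' h =>
      have h0 : d - s'.length = 0 := by omega
      simp [h0]

theorem zpad_eq (n : Int) (d : Nat) : zpadB n d = zpadA n d := by
  unfold zpadA zpadB
  rw [zpadLoopA_eq]

-- one unfolding step of the binary search, in each of its three cases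
theorem bsB_lt {pre : List Int} {num : Int} {lo hi : Nat} (h : lo < hi)
    (hc : pre.getD ((lo + hi) / 2) 0 < num) :
    bsB pre num lo hi = bsB pre num ((lo + hi) / 2 + 1) hi := by
  rw [bsB, if_pos h, if_pos hc]

theorem bsB_ge {pre : List Int} {num : Int} {lo hi : Nat} (h : lo < hi)
    (hc : ¬ pre.getD ((lo + hi) / 2) 0 < num) :
    bsB pre num lo hi = bsB pre num lo ((lo + hi) / 2) := by
  rw [bsB, if_pos h, if_neg hc]

theorem bsB_stop {pre : List Int} {num : Int} {lo hi : Nat} (h : ¬ lo < hi) :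
    bsB pre num lo hi = lo := by
  rw [bsB, if_neg h]

theorem main_eval (num : Int) (hpre : num ≤ 1889) :
    episode_conv num = episode_conv_alt num := by
  by_cases h0 : num ≤ 8
  · have hbs : bsB preLit num 0 21 = 0 := by
      rw [bsB_ge (by norm_num) (by norm_num [preLit]; omega)]; norm_num
      rw [bsB_ge (by norm_num) (by norm_num [preLit]; omega)]; norm_num
      rw [bsB_ge (by norm_num) (by norm_num [preLit]; omega)]; norm_num
      rw [bsB_ge (by norm_num) (by norm_num [preLit]; omega)]; norm_num
      rw [bsB_ge (by norm_num) (by norm_num [preLit]; omega)]; norm_num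
      rw [bsB_stop (by norm_num)]
    simp only [episode_conv, episode_conv_alt, seasonsA, loopA, prefix_eval, preLit_len, hbs]
    norm_num [preLit]
    rw [if_pos h0]
    simp [zpad_eq]
  by_cases h1 : num ≤ 30
  · have hbs : bsB preLit num 0 21 = 1 := by
      rw [bsB_ge (by norm_num) (by norm_num [preLit]; omega)]; norm_num
      rw [bsB_ge (by norm_num) (by norm_num [preLit]; omega)]; norm_num
      rw [bsB_ge (by norm_num) (by norm_num [preLit]; omega)]; norm_num
      rw [bsB_ge (by norm_num) (by norm_num [preLit]; omega)]; norm_num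
      rw [bsB_lt (by norm_num) (by norm_num [preLit]; omega)]; norm_num
      rw [bsB_stop (by norm_num)]
    simp only [episode_conv, episode_conv_alt, seasonsA, loopA, prefix_eval, preLit_len, hbs]
    norm_num [preLit]
    rw [if_neg h0, if_pos h1]
    simp [zpad_eq]
  by_cases h2 : num ≤ 47
  · have hbs : bsB preLit num 0 21 = 2 := by
      rw [bsB_ge (by norm_num) (by norm_num [preLit]; omega)]; norm_num
      rw [bsB_ge (by norm_num) (by norm_num [preLit]; omega)]; norm_num
      rw [bsB_ge (by norm_num) (by norm_num [preLit]; omega)]; norm_num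
      rw [bsB_lt (by norm_num) (by norm_num [preLit]; omega)]; norm_num
      rw [bsB_stop (by norm_num)]
    simp only [episode_conv, episode_conv_alt, seasonsA, loopA, prefix_eval, preLit_len, hbs]
    norm_num [preLit]
    rw [if_neg h0, if_neg h1, if_pos h2]
    simp [zpad_eq]
  by_cases h3 : num ≤ 60
  · have hbs : bsB preLit num 0 21 = 3 := by
      rw [bsB_ge (by norm_num) (by norm_num [preLit]; omega)]; norm_num
      rw [bsB_ge (by norm_num) (by norm_num [preLit]; omega)]; norm_num
      rw [bsB_lt (by norm_num) (by norm_num [preLit]; omega)]; norm_num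
      rw [bsB_ge (by norm_num) (by norm_num [preLit]; omega)]; norm_num
      rw [bsB_ge (by norm_num) (by norm_num [preLit]; omega)]; norm_num
      rw [bsB_stop (by norm_num)]
    simp only [episode_conv, episode_conv_alt, seasonsA, loopA, prefix_eval, preLit_len, hbs]
    norm_num [preLit]
    rw [if_neg h0, if_neg h1, if_neg h2, if_pos h3]
    simp [zpad_eq]
  by_cases h4 : num ≤ 69
  · have hbs : bsB preLit num 0 21 = 4 := by
      rw [bsB_ge (by norm_num) (by norm_num [preLit]; omega)]; norm_num
      rw [bsB_ge (by norm_num) (by norm_num [preLit]; omega)]; norm_num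
      rw [bsB_lt (by norm_num) (by norm_num [preLit]; omega)]; norm_num
      rw [bsB_ge (by norm_num) (by norm_num [preLit]; omega)]; norm_num
      rw [bsB_lt (by norm_num) (by norm_num [preLit]; omega)]; norm_num
      rw [bsB_stop (by norm_num)]
    simp only [episode_conv, episode_conv_alt, seasonsA, loopA, prefix_eval, preLit_len, hbs]
    norm_num [preLit]
    rw [if_neg h0, if_neg h1, if_neg h2, if_neg h3, if_pos h4]
    simp [zpad_eq]
  by_cases h5 : num ≤ 91
  · have hbs : bsB preLit num 0 21 = 5 := by
      rw [bsB_ge (by norm_num) (by norm_num [preLit]; omega)]; norm_num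
      rw [bsB_ge (by norm_num) (by norm_num [preLit]; omega)]; norm_num
      rw [bsB_lt (by norm_num) (by norm_num [preLit]; omega)]; norm_num
      rw [bsB_lt (by norm_num) (by norm_num [preLit]; omega)]; norm_num
      rw [bsB_stop (by norm_num)]
    simp only [episode_conv, episode_conv_alt, seasonsA, loopA, prefix_eval, preLit_len, hbs]
    norm_num [preLit]
    rw [if_neg h0, if_neg h1, if_neg h2, if_neg h3, if_neg h4, if_pos h5]
    simp [zpad_eq]
  by_cases h6 : num ≤ 130
  · have hbs : bsB preLit num 0 21 = 6 := by
      rw [bsB_ge (by norm_num) (by norm_num [preLit]; omega)]; norm_num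
      rw [bsB_lt (by norm_num) (by norm_num [preLit]; omega)]; norm_num
      rw [bsB_ge (by norm_num) (by norm_num [preLit]; omega)]; norm_num
      rw [bsB_ge (by norm_num) (by norm_num [preLit]; omega)]; norm_num
      rw [bsB_ge (by norm_num) (by norm_num [preLit]; omega)]; norm_num
      rw [bsB_stop (by norm_num)]
    simp only [episode_conv, episode_conv_alt, seasonsA, loopA, prefix_eval, preLit_len, hbs]
    norm_num [preLit]
    rw [if_neg h0, if_neg h1, if_neg h2, if_neg h3, if_neg h4, if_neg h5, if_pos h6]
    simp [zpad_eq]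
  by_cases h7 : num ≤ 143
  · have hbs : bsB preLit num 0 21 = 7 := by
      rw [bsB_ge (by norm_num) (by norm_num [preLit]; omega)]; norm_num
      rw [bsB_lt (by norm_num) (by norm_num [preLit]; omega)]; norm_num
      rw [bsB_ge (by norm_num) (by norm_num [preLit]; omega)]; norm_num
      rw [bsB_ge (by norm_num) (by norm_num [preLit]; omega)]; norm_num
      rw [bsB_lt (by norm_num) (by norm_num [preLit]; omega)]; norm_num
      rw [bsB_stop (by norm_num)]
    simp only [episode_conv, episode_conv_alt, seasonsA, loopA, prefix_eval, preLit_len, hbs]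
    norm_num [preLit]
    rw [if_neg h0, if_neg h1, if_neg h2, if_neg h3, if_neg h4, if_neg h5, if_neg h6, if_pos h7]
    simp [zpad_eq]
  by_cases h8 : num ≤ 195
  · have hbs : bsB preLit num 0 21 = 8 := by
      rw [bsB_ge (by norm_num) (by norm_num [preLit]; omega)]; norm_num
      rw [bsB_lt (by norm_num) (by norm_num [preLit]; omega)]; norm_num
      rw [bsB_ge (by norm_num) (by norm_num [preLit]; omega)]; norm_num
      rw [bsB_lt (by norm_num) (by norm_num [preLit]; omega)]; norm_num
      rw [bsB_stop (by norm_num)]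
    simp only [episode_conv, episode_conv_alt, seasonsA, loopA, prefix_eval, preLit_len, hbs]
    norm_num [preLit]
    rw [if_neg h0, if_neg h1, if_neg h2, if_neg h3, if_neg h4, if_neg h5, if_neg h6, if_neg h7, if_pos h8]
    simp [zpad_eq]
  by_cases h9 : num ≤ 226
  · have hbs : bsB preLit num 0 21 = 9 := by
      rw [bsB_ge (by norm_num) (by norm_num [preLit]; omega)]; norm_num
      rw [bsB_lt (by norm_num) (by norm_num [preLit]; omega)]; norm_num
      rw [bsB_lt (by norm_num) (by norm_num [preLit]; omega)]; norm_num
      rw [bsB_ge (by norm_num) (by norm_num [preLit]; omega)]; norm_num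
      rw [bsB_stop (by norm_num)]
    simp only [episode_conv, episode_conv_alt, seasonsA, loopA, prefix_eval, preLit_len, hbs]
    norm_num [preLit]
    rw [if_neg h0, if_neg h1, if_neg h2, if_neg h3, if_neg h4, if_neg h5, if_neg h6, if_neg h7, if_neg h8, if_pos h9]
    simp [zpad_eq]
  by_cases h10 : num ≤ 325
  · have hbs : bsB preLit num 0 21 = 10 := by
      rw [bsB_ge (by norm_num) (by norm_num [preLit]; omega)]; norm_num
      rw [bsB_lt (by norm_num) (by norm_num [preLit]; omega)]; norm_num
      rw [bsB_lt (by norm_num) (by norm_num [preLit]; omega)]; norm_num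
      rw [bsB_lt (by norm_num) (by norm_num [preLit]; omega)]; norm_num
      rw [bsB_stop (by norm_num)]
    simp only [episode_conv, episode_conv_alt, seasonsA, loopA, prefix_eval, preLit_len, hbs]
    norm_num [preLit]
    rw [if_neg h0, if_neg h1, if_neg h2, if_neg h3, if_neg h4, if_neg h5, if_neg h6, if_neg h7, if_neg h8, if_neg h9, if_pos h10]
    simp [zpad_eq]
  by_cases h11 : num ≤ 381
  · have hbs : bsB preLit num 0 21 = 11 := by
      rw [bsB_lt (by norm_num) (by norm_num [preLit]; omega)]; norm_num
      rw [bsB_ge (by norm_num) (by norm_num [preLit]; omega)]; norm_num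
      rw [bsB_ge (by norm_num) (by norm_num [preLit]; omega)]; norm_num
      rw [bsB_ge (by norm_num) (by norm_num [preLit]; omega)]; norm_num
      rw [bsB_ge (by norm_num) (by norm_num [preLit]; omega)]; norm_num
      rw [bsB_stop (by norm_num)]
    simp only [episode_conv, episode_conv_alt, seasonsA, loopA, prefix_eval, preLit_len, hbs]
    norm_num [preLit]
    rw [if_neg h0, if_neg h1, if_neg h2, if_neg h3, if_neg h4, if_neg h5, if_neg h6, if_neg h7, if_neg h8, if_neg h9, if_neg h10, if_pos h11]
    simp [zpad_eq]
  by_cases h12 : num ≤ 481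
  · have hbs : bsB preLit num 0 21 = 12 := by
      rw [bsB_lt (by norm_num) (by norm_num [preLit]; omega)]; norm_num
      rw [bsB_ge (by norm_num) (by norm_num [preLit]; omega)]; norm_num
      rw [bsB_ge (by norm_num) (by norm_num [preLit]; omega)]; norm_num
      rw [bsB_ge (by norm_num) (by norm_num [preLit]; omega)]; norm_num
      rw [bsB_lt (by norm_num) (by norm_num [preLit]; omega)]; norm_num
      rw [bsB_stop (by norm_num)]
    simp only [episode_conv, episode_conv_alt, seasonsA, loopA, prefix_eval, preLit_len, hbs]
    norm_num [preLit]
    rw [if_neg h0, if_neg h1, if_neg h2, if_neg h3, if_neg h4, if_neg h5, if_neg h6, if_neg h7, if_neg h8, if_neg h9, if_neg h10, if_neg h11, if_pos h12]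
    simp [zpad_eq]
  by_cases h13 : num ≤ 516
  · have hbs : bsB preLit num 0 21 = 13 := by
      rw [bsB_lt (by norm_num) (by norm_num [preLit]; omega)]; norm_num
      rw [bsB_ge (by norm_num) (by norm_num [preLit]; omega)]; norm_num
      rw [bsB_ge (by norm_num) (by norm_num [preLit]; omega)]; norm_num
      rw [bsB_lt (by norm_num) (by norm_num [preLit]; omega)]; norm_num
      rw [bsB_stop (by norm_num)]
    simp only [episode_conv, episode_conv_alt, seasonsA, loopA, prefix_eval, preLit_len, hbs]
    norm_num [preLit]
    rw [if_neg h0, if_neg h1, if_neg h2, if_neg h3, if_neg h4, if_neg h5, if_neg h6, if_neg h7, if_neg h8, if_neg h9, if_neg h10, if_neg h11, if_neg h12, if_pos h13]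
    simp [zpad_eq]
  by_cases h14 : num ≤ 578
  · have hbs : bsB preLit num 0 21 = 14 := by
      rw [bsB_lt (by norm_num) (by norm_num [preLit]; omega)]; norm_num
      rw [bsB_ge (by norm_num) (by norm_num [preLit]; omega)]; norm_num
      rw [bsB_lt (by norm_num) (by norm_num [preLit]; omega)]; norm_num
      rw [bsB_ge (by norm_num) (by norm_num [preLit]; omega)]; norm_num
      rw [bsB_ge (by norm_num) (by norm_num [preLit]; omega)]; norm_num
      rw [bsB_stop (by norm_num)]
    simp only [episode_conv, episode_conv_alt, seasonsA, loopA, prefix_eval, preLit_len, hbs]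
    norm_num [preLit]
    rw [if_neg h0, if_neg h1, if_neg h2, if_neg h3, if_neg h4, if_neg h5, if_neg h6, if_neg h7, if_neg h8, if_neg h9, if_neg h10, if_neg h11, if_neg h12, if_neg h13, if_pos h14]
    simp [zpad_eq]
  by_cases h15 : num ≤ 627
  · have hbs : bsB preLit num 0 21 = 15 := by
      rw [bsB_lt (by norm_num) (by norm_num [preLit]; omega)]; norm_num
      rw [bsB_ge (by norm_num) (by norm_num [preLit]; omega)]; norm_num
      rw [bsB_lt (by norm_num) (by norm_num [preLit]; omega)]; norm_num
      rw [bsB_ge (by norm_num) (by norm_num [preLit]; omega)]; norm_num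
      rw [bsB_lt (by norm_num) (by norm_num [preLit]; omega)]; norm_num
      rw [bsB_stop (by norm_num)]
    simp only [episode_conv, episode_conv_alt, seasonsA, loopA, prefix_eval, preLit_len, hbs]
    norm_num [preLit]
    rw [if_neg h0, if_neg h1, if_neg h2, if_neg h3, if_neg h4, if_neg h5, if_neg h6, if_neg h7, if_neg h8, if_neg h9, if_neg h10, if_neg h11, if_neg h12, if_neg h13, if_neg h14, if_pos h15]
    simp [zpad_eq]
  by_cases h16 : num ≤ 745
  · have hbs : bsB preLit num 0 21 = 16 := by
      rw [bsB_lt (by norm_num) (by norm_num [preLit]; omega)]; norm_num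
      rw [bsB_ge (by norm_num) (by norm_num [preLit]; omega)]; norm_num
      rw [bsB_lt (by norm_num) (by norm_num [preLit]; omega)]; norm_num
      rw [bsB_lt (by norm_num) (by norm_num [preLit]; omega)]; norm_num
      rw [bsB_stop (by norm_num)]
    simp only [episode_conv, episode_conv_alt, seasonsA, loopA, prefix_eval, preLit_len, hbs]
    norm_num [preLit]
    rw [if_neg h0, if_neg h1, if_neg h2, if_neg h3, if_neg h4, if_neg h5, if_neg h6, if_neg h7, if_neg h8, if_neg h9, if_neg h10, if_neg h11, if_neg h12, if_neg h13, if_neg h14, if_neg h15, if_pos h16]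
    simp [zpad_eq]
  by_cases h17 : num ≤ 778
  · have hbs : bsB preLit num 0 21 = 17 := by
      rw [bsB_lt (by norm_num) (by norm_num [preLit]; omega)]; norm_num
      rw [bsB_lt (by norm_num) (by norm_num [preLit]; omega)]; norm_num
      rw [bsB_ge (by norm_num) (by norm_num [preLit]; omega)]; norm_num
      rw [bsB_ge (by norm_num) (by norm_num [preLit]; omega)]; norm_num
      rw [bsB_ge (by norm_num) (by norm_num [preLit]; omega)]; norm_num
      rw [bsB_stop (by norm_num)]
    simp only [episode_conv, episode_conv_alt, seasonsA, loopA, prefix_eval, preLit_len, hbs]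
    norm_num [preLit]
    rw [if_neg h0, if_neg h1, if_neg h2, if_neg h3, if_neg h4, if_neg h5, if_neg h6, if_neg h7, if_neg h8, if_neg h9, if_neg h10, if_neg h11, if_neg h12, if_neg h13, if_neg h14, if_neg h15, if_neg h16, if_pos h17]
    simp [zpad_eq]
  by_cases h18 : num ≤ 876
  · have hbs : bsB preLit num 0 21 = 18 := by
      rw [bsB_lt (by norm_num) (by norm_num [preLit]; omega)]; norm_num
      rw [bsB_lt (by norm_num) (by norm_num [preLit]; omega)]; norm_num
      rw [bsB_ge (by norm_num) (by norm_num [preLit]; omega)]; norm_num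
      rw [bsB_ge (by norm_num) (by norm_num [preLit]; omega)]; norm_num
      rw [bsB_lt (by norm_num) (by norm_num [preLit]; omega)]; norm_num
      rw [bsB_stop (by norm_num)]
    simp only [episode_conv, episode_conv_alt, seasonsA, loopA, prefix_eval, preLit_len, hbs]
    norm_num [preLit]
    rw [if_neg h0, if_neg h1, if_neg h2, if_neg h3, if_neg h4, if_neg h5, if_neg h6, if_neg h7, if_neg h8, if_neg h9, if_neg h10, if_neg h11, if_neg h12, if_neg h13, if_neg h14, if_neg h15, if_neg h16, if_neg h17, if_pos h18]
    simp [zpad_eq]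
  by_cases h19 : num ≤ 890
  · have hbs : bsB preLit num 0 21 = 19 := by
      rw [bsB_lt (by norm_num) (by norm_num [preLit]; omega)]; norm_num
      rw [bsB_lt (by norm_num) (by norm_num [preLit]; omega)]; norm_num
      rw [bsB_ge (by norm_num) (by norm_num [preLit]; omega)]; norm_num
      rw [bsB_lt (by norm_num) (by norm_num [preLit]; omega)]; norm_num
      rw [bsB_stop (by norm_num)]
    simp only [episode_conv, episode_conv_alt, seasonsA, loopA, prefix_eval, preLit_len, hbs]
    norm_num [preLit]
    rw [if_neg h0, if_neg h1, if_neg h2, if_neg h3, if_neg h4, if_neg h5, if_neg h6, if_neg h7, if_neg h8, if_neg h9, if_neg h10, if_neg h11, if_neg h12, if_neg h13, if_neg h14, if_neg h15, if_neg h16, if_neg h17, if_neg h18, if_pos h19]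
    simp [zpad_eq]
  have hbs : bsB preLit num 0 21 = 20 := by
    rw [bsB_lt (by norm_num) (by norm_num [preLit]; omega)]; norm_num
    rw [bsB_lt (by norm_num) (by norm_num [preLit]; omega)]; norm_num
    rw [bsB_lt (by norm_num) (by norm_num [preLit]; omega)]; norm_num
    rw [bsB_ge (by norm_num) (by norm_num [preLit]; omega)]; norm_num
    rw [bsB_stop (by norm_num)]
  simp only [episode_conv, episode_conv_alt, seasonsA, loopA, prefix_eval, preLit_len, hbs]
  norm_num [preLit]
  rw [if_neg h0, if_neg h1, if_neg h2, if_neg h3, if_neg h4, if_neg h5, if_neg h6, if_neg h7, if_neg h8, if_neg h9, if_neg h10, if_neg h11, if_neg h12, if_neg h13, if_neg h14, if_neg h15, if_neg h16, if_neg h17, if_neg h18, if_neg h19, if_pos hpre]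
  simp [zpad_eq]

-- ===== VERDICT (by name: the statement is the Claim_ definition above) =====
theorem episode_conv_spec : Claim_equal_episode_conv := by
  intro num hdom hpre
  exact main_eval num hpre
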